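-- pv_equiv track=rewrite | github.com/scrawlsbenches/Opus-code-test | scripts/generate_book.py | _group_by_themes
-- ===== SOURCE A (Python) =====
-- from typing import Dict, List, Optional, Any, Tuple, Set
-- from collections import defaultdict
--
-- def _group_by_themes(commits: List[Dict]) -> Dict[str, List[Dict]]:
--     """Group commits by keywords/themes."""
--     themes = defaultdict(list)
--     keywords = {
--         'ml': ['ml', 'machine learning', 'model', 'prediction', 'training'],
--         'search': ['search', 'query', 'retrieval', 'ranking', 'bm25', 'tfidf'],
--         'performance': ['performance', 'optimize', 'speed', 'cache', 'fast'],
--         'testing': ['test', 'coverage', 'benchmark', 'validation'],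
--         'documentation': ['docs', 'documentation', 'guide', 'readme'],
--         'api': ['api', 'interface', 'method', 'function'],
--         'data': ['data', 'storage', 'persistence', 'save', 'load'],
--         'analysis': ['analysis', 'algorithm', 'pagerank', 'clustering', 'graph'],
--     }
--
--     for commit in commits:
--         msg_lower = commit['message'].lower()
--         matched = False
--         for theme, words in keywords.items():
--             if any(word in msg_lower for word in words):
--                 themes[theme].append(commit)
--                 matched = True
--                 break
--         if not matched:
--             themes['other'].append(commit)
--
--     return dict(themes)
-- ===== SOURCE B (Python) =====
-- def _group_by_themes(commits):
--     """Group commits by keywords/themes (theme-major sweep, ordered by first matching commit)."""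
--     keywords = {
--         'ml': ['ml', 'machine learning', 'model', 'prediction', 'training'],
--         'search': ['search', 'query', 'retrieval', 'ranking', 'bm25', 'tfidf'],
--         'performance': ['performance', 'optimize', 'speed', 'cache', 'fast'],
--         'testing': ['test', 'coverage', 'benchmark', 'validation'],
--         'documentation': ['docs', 'documentation', 'guide', 'readme'],
--         'api': ['api', 'interface', 'method', 'function'],
--         'data': ['data', 'storage', 'persistence', 'save', 'load'],
--         'analysis': ['analysis', 'algorithm', 'pagerank', 'clustering', 'graph'],
--     }
--
--     assigned = set()
--     groups = []
--     for theme, words in keywords.items():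
--         mine = []
--         for i, commit in enumerate(commits):
--             if i not in assigned and any(w in commit['message'].lower() for w in words):
--                 mine.append(i)
--                 assigned.add(i)
--         if mine:
--             groups.append((mine[0], theme, [commits[i] for i in mine]))
--     rest = [i for i in range(len(commits)) if i not in assigned]
--     if rest:
--         groups.append((rest[0], 'other', [commits[i] for i in rest]))
--     groups.sort(key=lambda g: g[0])
--     return {theme: grp for _, theme, grp in groups}
-- ===== Notes on version B (the rewrite author's own statement) =====
-- stated objective: alternative
-- what changed: B transposes A's commit-major loop into a theme-major sweep: for each theme in table order it scans all commits, collecting the indices of still-unassigned matching commits into that theme's group while recording assignment in a set of indices, appends a final 'other' group of unassigned indices, and sorts the groups by their first commit index to recover A's first-occurrence key order.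
import Mathlib
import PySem

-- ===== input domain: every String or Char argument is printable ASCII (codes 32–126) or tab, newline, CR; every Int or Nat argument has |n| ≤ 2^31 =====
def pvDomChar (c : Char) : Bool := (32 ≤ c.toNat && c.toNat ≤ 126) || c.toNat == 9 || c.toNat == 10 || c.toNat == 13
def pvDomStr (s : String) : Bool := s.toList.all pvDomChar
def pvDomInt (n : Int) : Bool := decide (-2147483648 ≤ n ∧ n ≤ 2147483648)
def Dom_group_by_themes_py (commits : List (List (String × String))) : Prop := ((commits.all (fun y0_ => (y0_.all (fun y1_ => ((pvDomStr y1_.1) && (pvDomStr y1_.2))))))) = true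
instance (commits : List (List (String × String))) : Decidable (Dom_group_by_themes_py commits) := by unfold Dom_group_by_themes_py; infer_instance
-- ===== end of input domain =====

-- B transposes A's commit-major loop into a theme-major sweep with an assigned-index set, then sorts the
-- groups by first commit index; objective: alternative decomposition, same match semantics.

-- the keyword table (identical literal in both Pythons)
def pvKeywords : List (String × List String) :=
  [("ml", ["ml", "machine learning", "model", "prediction", "training"]),
   ("search", ["search", "query", "retrieval", "ranking", "bm25", "tfidf"]),
   ("performance", ["performance", "optimize", "speed", "cache", "fast"]),
   ("testing", ["test", "coverage", "benchmark", "validation"]),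
   ("documentation", ["docs", "documentation", "guide", "readme"]),
   ("api", ["api", "interface", "method", "function"]),
   ("data", ["data", "storage", "persistence", "save", "load"]),
   ("analysis", ["analysis", "algorithm", "pagerank", "clustering", "graph"])]

-- commit['message'].lower() (exact inside Pre_, where the key is present)
def pvMsgLower (c : List (String × String)) : List Char :=
  PySem.Chars.lower ((PySem.Dict.getD (PySem.Dict.mk c) "message" "").toList)

-- ===== PORT A =====
-- A's inner 'for theme, words ... if any(...): ...; break' loop: first matching theme, none if no match
def pvFirstTheme : List (String × List String) → List Char → Option String
  | [], _ => none
  | (t, ws) :: rest, msg =>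
      if ws.any (fun w => PySem.Chars.isIn w.toList msg) then some t else pvFirstTheme rest msg

def group_by_themes_py (commits : List (List (String × String))) : List (String × List (List (String × String))) :=
  (commits.foldl
    (fun d c =>
      match pvFirstTheme pvKeywords (pvMsgLower c) with
      | some t => d.modify t [] (fun l => l ++ [c])        -- themes[theme].append(commit)
      | none => d.modify "other" [] (fun l => l ++ [c]))   -- themes['other'].append(commit)
    PySem.Dict.empty).items

-- ===== PORT B =====
-- 'any(w in commit['message'].lower() for w in words)'
def pvMatch (ws : List String) (c : List (String × String)) : Bool :=
  ws.any (fun w => PySem.Chars.isIn w.toList (pvMsgLower c))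

def group_by_themes_py_alt (commits : List (List (String × String))) : List (String × List (List (String × String))) :=
  -- for theme, words in keywords.items(): inner sweep over enumerate(commits) with the assigned set
  let st := pvKeywords.foldl
    (fun (st : PySem.Set Int × List (Int × String × List (List (String × String)))) tw =>
      let r := (PySem.List.enumerate commits 0).foldl
        (fun (r : PySem.Set Int × List Int) p =>
          if !(PySem.Set.contains r.1 p.1) && pvMatch tw.2 p.2
          then (PySem.Set.add r.1 p.1, r.2 ++ [p.1]) else r)
        (st.1, [])
      match r.2 with
      | [] => (r.1, st.2)                                   -- if mine: (empty — skip)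
      | i0 :: _ => (r.1, st.2 ++ [(i0, tw.1, r.2.map (fun i => PySem.List.pyGetD commits i []))]))
    (PySem.Set.empty, [])
  -- rest = [i for i in range(len(commits)) if i not in assigned]
  let rest := (PySem.List.pyRange 0 (PySem.List.len commits) 1).filter
    (fun i => !(PySem.Set.contains st.1 i))
  let groups := match rest with
    | [] => st.2
    | i0 :: _ => st.2 ++ [(i0, "other", rest.map (fun i => PySem.List.pyGetD commits i []))]
  -- groups.sort(key=lambda g: g[0]); {theme: grp for _, theme, grp in groups}
  (PySem.List.sorted groups (fun g => g.1) false).map (fun g => (g.2.1, g.2.2))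

-- ===== PRECONDITION & SPEC =====
-- Pre_ excludes exactly the commits without a 'message' key, on which A raises KeyError.
def Pre_group_by_themes_py (commits : List (List (String × String))) : Prop :=
  (commits.all (fun c => (PySem.Dict.mk c).contains "message")) = true
instance (commits : List (List (String × String))) : Decidable (Pre_group_by_themes_py commits) := by
  unfold Pre_group_by_themes_py; infer_instance

def pvWitness_group_by_themes_py : (List (List (String × String))) :=
  [[("message", "Add ML model training")], [("message", "tidy up")]]

def Spec_group_by_themes_py (commits : List (List (String × String))) (out : List (String × List (List (String × String)))) : Prop := out = group_by_themes_py_alt commits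
instance (commits : List (List (String × String))) (out : List (String × List (List (String × String)))) : Decidable (Spec_group_by_themes_py commits out) := by unfold Spec_group_by_themes_py; infer_instance

-- ===== CLAIM (what is proved, stated in full; the proofs are below) =====
def Claim_equal_group_by_themes_py : Prop := ∀ (commits : List (List (String × String))), Dom_group_by_themes_py commits → Pre_group_by_themes_py commits → Spec_group_by_themes_py commits (group_by_themes_py commits)

-- ===== LEMMAS AND PROOFS =====

-- the theme A assigns to a commit ('other' if no theme matches)
def pvLabel (c : List (String × String)) : String :=
  (pvFirstTheme pvKeywords (pvMsgLower c)).getD "other"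

-- B's group for a label, as commits
def pvGroup (commits : List (List (String × String))) (lab : String) : List (List (String × String)) :=
  commits.filter (fun c => pvLabel c == lab)

-- indices of the commits with a given label
def pvIdxs (commits : List (List (String × String))) (lab : String) : List Int :=
  ((PySem.List.enumerate commits 0).filter (fun p => pvLabel p.2 == lab)).map (fun p => p.1)

-- the (first-index, theme, group) triple B builds for a label
def pvEntry (commits : List (List (String × String))) (lab : String) :
    Int × String × List (List (String × String)) :=
  ((pvIdxs commits lab).head?.getD 0, lab,
    (pvIdxs commits lab).map (fun i => PySem.List.pyGetD commits i []))

-- spec of the assigned set after processing the themes named in ns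
def pvPhi (commits : List (List (String × String))) (ns : List String) (j : Int) : Bool :=
  if h : 0 ≤ j ∧ j.toNat < commits.length then decide (pvLabel commits[j.toNat] ∈ ns) else false

def pvNames : List String := pvKeywords.map (fun p => p.1)

-- ---------- A-side: A's fold as a group-by over dedup'd labels ----------

lemma pvStep_eq (d : PySem.Dict String (List (List (String × String)))) (c : List (String × String)) :
    (match pvFirstTheme pvKeywords (pvMsgLower c) with
      | some t => d.modify t [] (fun l => l ++ [c])
      | none => d.modify "other" [] (fun l => l ++ [c]))
    = d.modify (pvLabel c) [] (fun l => l ++ [c]) := by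
  unfold pvLabel
  cases h : pvFirstTheme pvKeywords (pvMsgLower c) <;> simp

-- contains on a "graph" dict
lemma pvContains_graph {V : Type} (ts : List String) (g : String → V) (k : String) :
    (PySem.Dict.mk (ts.map fun t => (t, g t))).contains k = decide (k ∈ ts) := by
  induction ts with
  | nil => simp [PySem.Dict.contains]
  | cons t rest ih =>
      simp only [PySem.Dict.contains, List.map_cons, List.any_cons] at ih ⊢
      by_cases h : t = k
      · subst h; simp
      · simp [h, Ne.symm h, ih]

-- getD on a "graph" dict at a present key
lemma pvGet?_graph {V : Type} (ts : List String) (g : String → V) (k : String) :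
    (PySem.Dict.mk (ts.map fun t => (t, g t))).get? k = if k ∈ ts then some (g k) else none := by
  induction ts with
  | nil => simp [PySem.Dict.get?]
  | cons t rest ih =>
      simp only [PySem.Dict.get?, List.map_cons] at ih ⊢
      rw [List.find?_cons]
      by_cases h : t = k
      · subst h; simp
      · have hb : ((t, g t).1 == k) = false := by simp [h]
        rw [hb, ih]
        simp [Ne.symm h]

-- modify on a "graph" dict
lemma pvModify_graph {V : Type} (ts : List String) (g : String → V) (k : String) (d0 : V) (f : V → V) :
    ((PySem.Dict.mk (ts.map fun t => (t, g t))).modify k d0 f).items =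
      if k ∈ ts then ts.map (fun t => (t, if t = k then f (g t) else g t))
      else ts.map (fun t => (t, g t)) ++ [(k, f d0)] := by
  unfold PySem.Dict.modify PySem.Dict.insert
  rw [pvContains_graph]
  by_cases hk : k ∈ ts
  · simp only [hk, decide_true, if_true, PySem.Dict.getD, pvGet?_graph, Option.getD_some]
    simp only [List.map_map]
    apply List.map_congr_left
    intro t ht
    by_cases h : t = k
    · subst h; simp
    · simp [h]
  · simp [hk, PySem.Dict.getD, pvGet?_graph]

-- dedup of an appended element
lemma pvDedup_append (ls : List String) (l : String) :
    PySem.List.dedup (ls ++ [l]) =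
      if l ∈ ls then PySem.List.dedup ls else PySem.List.dedup ls ++ [l] := by
  simp only [PySem.List.dedup, PySem.Set.ofList, List.foldl_append, List.foldl_cons, List.foldl_nil]
  have hc : PySem.Set.contains (List.foldl PySem.Set.add PySem.Set.empty ls) l = decide (l ∈ ls) := by
    have h2 := PySem.Set.mem_ofList ls l
    simp only [PySem.Set.ofList, PySem.Set.empty] at h2
    simp [PySem.Set.contains, h2]
  by_cases h : l ∈ ls <;> simp [PySem.Set.add, PySem.Set.contains] at hc ⊢ <;> simp [hc, h]

-- l not among firsts: filter of the zip is empty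
lemma pvFilter_zip_nil (ls : List String) (cs : List (List (String × String))) (l : String)
    (h : l ∉ ls) : (ls.zip cs).filter (fun p => p.1 == l) = [] := by
  rw [List.filter_eq_nil_iff]
  intro p hp
  have := List.of_mem_zip hp
  simp only [beq_iff_eq]
  intro hpl
  exact h (hpl ▸ this.1)

-- filter of the zip after appending one labelled commit
lemma pvZipFilter (ls : List String) (cs : List (List (String × String)))
    (l : String) (c : List (String × String)) (lab : String) (hlen : ls.length = cs.length) :
    ((((ls ++ [l]).zip (cs ++ [c])).filter (fun p => p.1 == lab)).map (fun p => p.2))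
      = (((ls.zip cs).filter (fun p => p.1 == lab)).map (fun p => p.2))
        ++ (if lab = l then [c] else []) := by
  rw [List.zip_append hlen]
  by_cases h : lab = l
  · subst h; simp [List.filter_append]
  · simp [List.filter_append, h, Ne.symm h]

-- the A-side invariant: A's fold, as an items list, is a group-by over dedup'd labels
lemma pvMain (cs : List (List (String × String))) :
    (cs.foldl
      (fun d c =>
        match pvFirstTheme pvKeywords (pvMsgLower c) with
        | some t => d.modify t [] (fun l => l ++ [c])
        | none => d.modify "other" [] (fun l => l ++ [c]))
      PySem.Dict.empty).items =
    (PySem.List.dedup (cs.map pvLabel)).map (fun lab =>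
      (lab, (((cs.map pvLabel).zip cs).filter (fun p => p.1 == lab)).map (fun p => p.2))) := by
  induction cs using List.reverseRecOn with
  | nil => rfl
  | append_singleton cs c ih =>
      rw [List.foldl_append, List.foldl_cons, List.foldl_nil]
      rw [pvStep_eq]
      rw [PySem.Dict.ext (x := cs.foldl _ PySem.Dict.empty)
        (y := PySem.Dict.mk ((PySem.List.dedup (cs.map pvLabel)).map (fun lab =>
          (lab, (((cs.map pvLabel).zip cs).filter (fun p => p.1 == lab)).map (fun p => p.2))))) ih]
      rw [pvModify_graph]
      simp only [List.map_append, List.map_cons, List.map_nil]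
      rw [pvDedup_append]
      simp only [PySem.List.mem_dedup]
      by_cases hl : pvLabel c ∈ cs.map pvLabel
      · simp only [hl, if_true]
        apply List.map_congr_left
        intro lab _
        rw [pvZipFilter _ _ _ _ _ (by simp)]
        by_cases h : lab = pvLabel c
        · subst h; simp
        · simp [h]
      · simp only [hl, if_false, List.map_append, List.map_cons, List.map_nil]
        congr 1
        · apply List.map_congr_left
          intro lab hmem
          rw [pvZipFilter _ _ _ _ _ (by simp)]
          have hne : lab ≠ pvLabel c := by
            rintro rfl
            exact hl ((PySem.List.mem_dedup _ _).mp hmem)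
          simp [hne]
        · rw [pvZipFilter _ _ _ _ _ (by simp)]
          rw [pvFilter_zip_nil _ _ _ (by simpa using hl)]
          simp

-- zip-form group = filter-form group
lemma pvGroup_zip (cs : List (List (String × String))) (lab : String) :
    (((cs.map pvLabel).zip cs).filter (fun p => p.1 == lab)).map (fun p => p.2)
      = pvGroup cs lab := by
  have h : (cs.map pvLabel).zip cs = cs.map (fun c => (pvLabel c, c)) := by
    have := List.zip_map' (f := pvLabel) (g := id) (l := cs)
    simpa using this
  rw [h, List.filter_map, List.map_map]
  simp [pvGroup, Function.comp_def]

-- ---------- B-side ----------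

-- contains after add
lemma pvContains_add (S : PySem.Set Int) (x j : Int) :
    PySem.Set.contains (PySem.Set.add S x) j = (PySem.Set.contains S j || j == x) := by
  simp only [PySem.Set.add, PySem.Set.contains]
  by_cases h : List.contains S x
  · simp only [h, if_true]
    by_cases hj : j = x
    · subst hj; simp_all
    · simp [hj]
  · simp only [h, Bool.false_eq_true, if_false]
    simp only [List.contains_eq_mem] at h
    by_cases hj : j = x
    · subst hj; simp [h]
    · simp [hj]

-- the inner sweep over an index/commit list
lemma pvInner (ws : List String) (ps : List (Int × List (String × String)))
    (hnd : ps.Pairwise (fun p q => p.1 < q.1))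
    (φ : Int → Bool) (S : PySem.Set Int) (hS : ∀ j, PySem.Set.contains S j = φ j)
    (m0 : List Int) :
    (ps.foldl
        (fun (r : PySem.Set Int × List Int) p =>
          if !(PySem.Set.contains r.1 p.1) && pvMatch ws p.2
          then (PySem.Set.add r.1 p.1, r.2 ++ [p.1]) else r)
        (S, m0)).2
      = m0 ++ (ps.filter (fun p => !φ p.1 && pvMatch ws p.2)).map (fun p => p.1)
    ∧ ∀ j, PySem.Set.contains
        (ps.foldl
          (fun (r : PySem.Set Int × List Int) p =>
            if !(PySem.Set.contains r.1 p.1) && pvMatch ws p.2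
            then (PySem.Set.add r.1 p.1, r.2 ++ [p.1]) else r)
          (S, m0)).1 j
        = (φ j || decide (j ∈ (ps.filter (fun p => !φ p.1 && pvMatch ws p.2)).map (fun p => p.1))) := by
  induction ps generalizing φ S m0 with
  | nil => exact ⟨by simp, fun j => by simpa using hS j⟩
  | cons p ps ih =>
      rw [List.pairwise_cons] at hnd
      rw [List.foldl_cons, List.filter_cons]
      simp only [hS p.1]
      by_cases hc : (!φ p.1 && pvMatch ws p.2) = true
      · rw [if_pos hc]
        simp only [hc, if_true]
        have hS' : ∀ j, PySem.Set.contains (PySem.Set.add S p.1) j = (φ j || (j == p.1)) :=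
          fun j => by rw [pvContains_add, hS]
        obtain ⟨h1, h2⟩ := ih hnd.2 (fun j => φ j || (j == p.1)) _ hS' (m0 ++ [p.1])
        have hfeq : ps.filter (fun q => !(φ q.1 || (q.1 == p.1)) && pvMatch ws q.2)
            = ps.filter (fun q => !φ q.1 && pvMatch ws q.2) := by
          apply List.filter_congr
          intro q hq
          have hlt := hnd.1 q hq
          have hne : (q.1 == p.1) = false := by
            simp only [beq_eq_false_iff_ne]; omega
          simp [hne]
        rw [hfeq] at h1 h2
        refine ⟨by rw [h1]; simp, fun j => ?_⟩
        rw [h2 j]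
        by_cases hj : j = p.1
        · subst hj; simp
        · have hb : (j == p.1) = false := by simp [hj]
          rw [hb]
          congr 1
          · rw [Bool.or_false]
          · rw [decide_eq_decide]
            simp [hj]
      · rw [if_neg hc]
        have hc' : (!φ p.1 && pvMatch ws p.2) = false := by
          simpa using hc
        simp only [hc', Bool.false_eq_true, if_false]
        exact ih hnd.2 φ S hS m0

-- pvFirstTheme on an append
lemma pvFirst_append (xs ys : List (String × List String)) (m : List Char) :
    pvFirstTheme (xs ++ ys) m = (pvFirstTheme xs m).or (pvFirstTheme ys m) := by
  induction xs with
  | nil => simp [pvFirstTheme]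
  | cons p rest ih =>
      obtain ⟨t, ws⟩ := p
      simp only [List.cons_append, pvFirstTheme]
      split <;> simp [ih]

-- a found theme is among the names
lemma pvFirst_mem (xs : List (String × List String)) (m : List Char) (t : String)
    (h : pvFirstTheme xs m = some t) : t ∈ xs.map (fun p => p.1) := by
  induction xs with
  | nil => simp [pvFirstTheme] at h
  | cons p rest ih =>
      obtain ⟨t', ws⟩ := p
      simp only [pvFirstTheme] at h
      split at h
      · simp at h; simp [h]
      · simp [ih h]

-- every label is a theme name or 'other'
lemma pvLabel_mem (c : List (String × String)) : pvLabel c ∈ pvNames ++ ["other"] := by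
  unfold pvLabel pvNames
  cases h : pvFirstTheme pvKeywords (pvMsgLower c) with
  | none => simp
  | some t => simp [pvFirst_mem _ _ _ h]

-- the sweep condition at theme (t, ws) is 'label = t'
lemma pvCond_eq (pre : List (String × List String)) (t : String) (ws : List String)
    (suf : List (String × List String)) (h : pvKeywords = pre ++ (t, ws) :: suf)
    (c : List (String × String)) :
    (!(decide (pvLabel c ∈ pre.map (fun p => p.1))) && pvMatch ws c) = (pvLabel c == t) := by
  have hnd : (pvKeywords.map (fun p => p.1)).Nodup := by decide
  have hoth : "other" ∉ pvKeywords.map (fun p => p.1) := by decide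
  rw [h] at hnd hoth
  simp only [List.map_append, List.map_cons, List.nodup_append, List.nodup_cons,
    List.mem_append, List.mem_cons, not_or] at hnd hoth
  unfold pvLabel pvMatch
  rw [h, pvFirst_append]
  cases hp : pvFirstTheme pre (pvMsgLower c) with
  | some t' =>
      have ht' : t' ∈ pre.map (fun p => p.1) := pvFirst_mem _ _ _ hp
      have hne : t' ≠ t := by
        intro e; subst e
        exact (hnd.2.2 _ ht' _ (Or.inl rfl)) rfl
      simp [Option.or, ht', hne]
  | none =>
      simp only [Option.or, pvFirstTheme]
      by_cases hm : ws.any (fun w => PySem.Chars.isIn w.toList (pvMsgLower c))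
      · have htpre : t ∉ pre.map (fun p => p.1) := by
          intro hmem
          exact (hnd.2.2 _ hmem _ (Or.inl rfl)) rfl
        simp [hm, htpre]
      · simp only [hm, Bool.false_eq_true, if_false, Bool.and_false]
        cases hs : pvFirstTheme suf (pvMsgLower c) with
        | some t'' =>
            have ht'' : t'' ∈ suf.map (fun p => p.1) := pvFirst_mem _ _ _ hs
            have hne : t ≠ t'' := fun e => hnd.2.1.1 (e ▸ ht'')
            simp [Option.getD, Ne.symm hne]
        | none =>
            have h2 : ¬("other" = t) := hoth.2.1
            simp [Option.getD, h2]


-- filtered-enumerate projections: commits of a label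
lemma pvIdxs_map_get (commits : List (List (String × String))) (lab : String) :
    (pvIdxs commits lab).map (fun i => PySem.List.pyGetD commits i [])
      = pvGroup commits lab := by
  unfold pvIdxs
  rw [List.map_map]
  rw [List.map_congr_left (g := fun p => p.2) (fun p hp => by
    have hpm := List.mem_of_mem_filter hp
    obtain ⟨k, hk, rfl⟩ := (PySem.List.mem_enumerate_iff _ _ _).mp hpm
    simp only [Function.comp]
    rw [show (0 : Int) + (k : Int) = (k : Int) by ring, PySem.List.pyGetD_natCast]
    simp [List.getD, List.getElem?_eq_getElem hk])]
  conv_rhs => rw [pvGroup, show commits = (PySem.List.enumerate commits 0).map (fun p => p.2)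
    from (PySem.List.map_snd_enumerate commits 0).symm]
  rw [List.filter_map]
  rfl

-- head of the filtered-enumerate index list
lemma pvIdxs_head (l : List (List (String × String))) (q : List (String × String) → Bool) (s : Int) :
    ((((PySem.List.enumerate l s).filter (fun p => q p.2)).map (fun p => p.1)).head?)
      = (l.findIdx? q).map (fun k => s + (k : Int)) := by
  induction l generalizing s with
  | nil => simp [PySem.List.enumerate_nil]
  | cons c l ih =>
      rw [PySem.List.enumerate_cons, List.filter_cons, List.findIdx?_cons]
      by_cases hq : q c
      · simp [hq]
      · simp only [hq, Bool.false_eq_true, if_false]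
        rw [ih (s + 1)]
        cases l.findIdx? q with
        | none => simp
        | some k => simp; ring

-- emptiness of the index list
lemma pvIdxs_nil_iff (commits : List (List (String × String))) (lab : String) :
    (pvIdxs commits lab = []) ↔ lab ∉ commits.map pvLabel := by
  unfold pvIdxs
  rw [List.map_eq_nil_iff, List.filter_eq_nil_iff]
  constructor
  · intro h hmem
    obtain ⟨c, hc, he⟩ := List.mem_map.mp hmem
    obtain ⟨k, hk, rfl⟩ := List.mem_iff_getElem.mp hc
    exact h ((0 : Int) + (k : Int), commits[k])
      ((PySem.List.mem_enumerate_iff _ _ _).mpr ⟨k, hk, rfl⟩) (by simp [he])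
  · intro h p hp
    obtain ⟨k, hk, rfl⟩ := (PySem.List.mem_enumerate_iff _ _ _).mp hp
    simp only [beq_iff_eq]
    intro he
    exact h (List.mem_map.mpr ⟨commits[k], List.getElem_mem hk, he⟩)

-- membership in the index list of a label
lemma pvMem_idxs (commits : List (List (String × String))) (lab : String) (j : Int) :
    j ∈ pvIdxs commits lab ↔
      ∃ (k : Nat) (hk : k < commits.length), j = (k : Int) ∧ pvLabel commits[k] = lab := by
  unfold pvIdxs
  simp only [List.mem_map, List.mem_filter]
  constructor
  · rintro ⟨p, ⟨hp, hl⟩, rfl⟩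
    obtain ⟨k, hk, rfl⟩ := (PySem.List.mem_enumerate_iff _ _ _).mp hp
    exact ⟨k, hk, by simp, by simpa using hl⟩
  · rintro ⟨k, hk, rfl, he⟩
    exact ⟨((0 : Int) + (k : Int), commits[k]),
      ⟨(PySem.List.mem_enumerate_iff _ _ _).mpr ⟨k, hk, rfl⟩, by simpa using he⟩, by simp⟩

-- extending the assigned-set spec by one theme
lemma pvPhi_snoc (commits : List (List (String × String))) (ns : List String) (t : String) (j : Int) :
    (pvPhi commits ns j || decide (j ∈ pvIdxs commits t)) = pvPhi commits (ns ++ [t]) j := by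
  unfold pvPhi
  by_cases h : 0 ≤ j ∧ j.toNat < commits.length
  · rw [dif_pos h, dif_pos h]
    have hiff : (j ∈ pvIdxs commits t) ↔ pvLabel commits[j.toNat] = t := by
      rw [pvMem_idxs]
      constructor
      · rintro ⟨k, hk, rfl, he⟩
        simpa using he
      · intro he
        exact ⟨j.toNat, h.2, (Int.toNat_of_nonneg h.1).symm, he⟩
    by_cases hl : pvLabel commits[j.toNat] ∈ ns
    · simp [hl]
    · by_cases ht : pvLabel commits[j.toNat] = t <;> simp [hl, ht, hiff]
  · rw [dif_neg h, dif_neg h]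
    have hni : j ∉ pvIdxs commits t := by
      rw [pvMem_idxs]
      rintro ⟨k, hk, rfl, -⟩
      exact h ⟨Int.natCast_nonneg k, by simpa using hk⟩
    simp [hni]

-- the outer fold over a suffix of the keyword table
lemma pvOuter (commits : List (List (String × String)))
    (suf pre : List (String × List String)) (h : pvKeywords = pre ++ suf)
    (S : PySem.Set Int)
    (hS : ∀ j, PySem.Set.contains S j = pvPhi commits (pre.map (fun p => p.1)) j)
    (acc : List (Int × String × List (List (String × String)))) :
    (suf.foldl
        (fun (st : PySem.Set Int × List (Int × String × List (List (String × String)))) tw =>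
          let r := (PySem.List.enumerate commits 0).foldl
            (fun (r : PySem.Set Int × List Int) p =>
              if !(PySem.Set.contains r.1 p.1) && pvMatch tw.2 p.2
              then (PySem.Set.add r.1 p.1, r.2 ++ [p.1]) else r)
            (st.1, [])
          match r.2 with
          | [] => (r.1, st.2)
          | i0 :: _ => (r.1, st.2 ++ [(i0, tw.1, r.2.map (fun i => PySem.List.pyGetD commits i []))]))
        (S, acc)).2
      = acc ++ ((suf.map (fun p => p.1)).filter (fun t => !(pvIdxs commits t).isEmpty)).map (pvEntry commits)
    ∧ ∀ j, PySem.Set.contains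
        (suf.foldl
          (fun (st : PySem.Set Int × List (Int × String × List (List (String × String)))) tw =>
            let r := (PySem.List.enumerate commits 0).foldl
              (fun (r : PySem.Set Int × List Int) p =>
                if !(PySem.Set.contains r.1 p.1) && pvMatch tw.2 p.2
                then (PySem.Set.add r.1 p.1, r.2 ++ [p.1]) else r)
              (st.1, [])
            match r.2 with
            | [] => (r.1, st.2)
            | i0 :: _ => (r.1, st.2 ++ [(i0, tw.1, r.2.map (fun i => PySem.List.pyGetD commits i []))]))
          (S, acc)).1 j
        = pvPhi commits ((pre ++ suf).map (fun p => p.1)) j := by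
  induction suf generalizing pre S acc with
  | nil => exact ⟨by simp, fun j => by simpa using hS j⟩
  | cons tw suf ih =>
      obtain ⟨t, ws⟩ := tw
      rw [List.foldl_cons]
      dsimp only
      obtain ⟨h1, h2⟩ := pvInner ws (PySem.List.enumerate commits 0)
        (PySem.List.pairwise_lt_enumerate _ _) (pvPhi commits (pre.map (fun p => p.1))) S hS []
      have hf : (PySem.List.enumerate commits 0).filter
            (fun p => !pvPhi commits (pre.map (fun p => p.1)) p.1 && pvMatch ws p.2)
          = (PySem.List.enumerate commits 0).filter (fun p => pvLabel p.2 == t) := by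
        apply List.filter_congr
        intro p hp
        obtain ⟨k, hk, rfl⟩ := (PySem.List.mem_enumerate_iff _ _ _).mp hp
        have hphi : pvPhi commits (pre.map (fun q => q.1)) ((0 : Int) + (k : Int))
            = decide (pvLabel commits[k] ∈ pre.map (fun q => q.1)) := by
          unfold pvPhi
          rw [dif_pos ⟨by positivity, by simpa using hk⟩]
          simp
        rw [hphi]
        exact pvCond_eq pre t ws suf h commits[k]
      rw [hf] at h1 h2
      have hmine : (List.foldl
          (fun (r : PySem.Set Int × List Int) p =>
            if !(PySem.Set.contains r.1 p.1) && pvMatch ws p.2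
            then (PySem.Set.add r.1 p.1, r.2 ++ [p.1]) else r)
          (S, []) (PySem.List.enumerate commits 0)).2 = pvIdxs commits t := by
        rw [h1]; rfl
      have hS' : ∀ j, PySem.Set.contains (List.foldl
          (fun (r : PySem.Set Int × List Int) p =>
            if !(PySem.Set.contains r.1 p.1) && pvMatch ws p.2
            then (PySem.Set.add r.1 p.1, r.2 ++ [p.1]) else r)
          (S, []) (PySem.List.enumerate commits 0)).1 j
          = pvPhi commits ((pre ++ [(t, ws)]).map (fun p => p.1)) j := by
        intro j
        rw [h2 j]
        have hmn : (pre ++ [(t, ws)]).map (fun p => p.1) = pre.map (fun p => p.1) ++ [t] := by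
          simp
        rw [hmn, ← pvPhi_snoc]
        rfl
      have h' : pvKeywords = (pre ++ [(t, ws)]) ++ suf := by
        rw [h]; simp
      have hnm : ((pre ++ [(t, ws)]) ++ suf).map (fun p => p.1)
          = (pre ++ (t, ws) :: suf).map (fun p => p.1) := by
        simp
      rw [hmine]
      cases hI : pvIdxs commits t with
      | nil =>
          obtain ⟨g1, g2⟩ := ih (pre ++ [(t, ws)]) h' _ hS' acc
          constructor
          · rw [g1]
            simp only [List.map_cons, List.filter_cons, hI]
            simp
          · intro j
            rw [g2 j, hnm]
      | cons i0 l =>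
          obtain ⟨g1, g2⟩ := ih (pre ++ [(t, ws)]) h' _ hS'
            (acc ++ [(i0, t, (i0 :: l).map (fun i => PySem.List.pyGetD commits i []))])
          constructor
          · rw [g1]
            simp only [List.map_cons, List.filter_cons, hI]
            have hent : pvEntry commits t
                = (i0, t, (i0 :: l).map (fun i => PySem.List.pyGetD commits i [])) := by
              simp [pvEntry, hI]
            simp [hent]
          · intro j
            rw [g2 j, hnm]

-- rest of the indices: the 'other' group
lemma pvRest (commits : List (List (String × String)))
    (S : PySem.Set Int)
    (hS : ∀ j, PySem.Set.contains S j = pvPhi commits pvNames j) :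
    (PySem.List.pyRange 0 (PySem.List.len commits) 1).filter
        (fun i => !(PySem.Set.contains S i))
      = pvIdxs commits "other" := by
  have hrange : PySem.List.pyRange 0 (PySem.List.len commits) 1
      = (PySem.List.enumerate commits 0).map (fun p => p.1) := by
    rw [PySem.List.map_fst_enumerate]
    norm_num [PySem.List.len]
  rw [hrange, List.filter_map]
  unfold pvIdxs
  congr 1
  apply List.filter_congr
  intro p hp
  obtain ⟨k, hk, rfl⟩ := (PySem.List.mem_enumerate_iff _ _ _).mp hp
  simp only [Function.comp]
  rw [hS]
  have hphi : pvPhi commits pvNames ((0 : Int) + (k : Int))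
      = decide (pvLabel commits[k] ∈ pvNames) := by
    unfold pvPhi
    rw [dif_pos ⟨by positivity, by simpa using hk⟩]
    simp
  rw [hphi]
  have hmem := pvLabel_mem commits[k]
  have hoth : "other" ∉ pvNames := by decide
  by_cases hin : pvLabel commits[k] ∈ pvNames
  · have hne : ¬(pvLabel commits[k] = "other") := fun e => hoth (e ▸ hin)
    simp [hin, hne]
  · have heq : pvLabel commits[k] = "other" := by
      rcases List.mem_append.mp hmem with h1 | h1
      · exact absurd h1 hin
      · simpa using h1
    simp [heq, hoth]

-- first-occurrence index, as used for the sort key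
lemma pvIdxs_head_key (commits : List (List (String × String))) (lab : String) :
    (pvIdxs commits lab).head?.getD 0
      = (((commits.map pvLabel).findIdx? (fun x => x == lab)).getD 0 : Nat) := by
  unfold pvIdxs
  rw [pvIdxs_head commits (fun c => pvLabel c == lab) 0, List.findIdx?_map]
  simp only [Function.comp_def]
  cases h : commits.findIdx? (fun x => pvLabel x == lab) with
  | none => simp
  | some k => simp

-- dedup lists first occurrences in increasing index order
lemma pvDedup_pairwise (ls : List String) :
    (PySem.List.dedup ls).Pairwise
      (fun a b => (ls.findIdx? (fun x => x == a)).getD 0 < (ls.findIdx? (fun x => x == b)).getD 0) := by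
  have hbr : ∀ (l : List String) (a : String),
      l.findIdx? (fun x => x == a) = PySem.List.index? l a := by
    intro l a
    rw [PySem.List.index?_eq_idxOf?]
    rfl
  have hbound : ∀ (l : List String) (a : String), a ∈ l →
      (PySem.List.index? l a).getD 0 < l.length := by
    intro l a ha
    obtain ⟨k, hk⟩ := Option.isSome_iff_exists.mp ((PySem.List.index?_isSome_iff l a).mpr ha)
    obtain ⟨pre, suf, heq, hlen, -⟩ := (PySem.List.index?_eq_some_iff _ _ _).mp hk
    rw [hk]
    subst heq
    simp only [Option.getD_some, List.length_append, List.length_cons]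
    omega
  induction ls using List.reverseRecOn with
  | nil => exact List.Pairwise.nil
  | append_singleton l x ih =>
      rw [pvDedup_append]
      by_cases hx : x ∈ l
      · rw [if_pos hx]
        refine ih.imp_of_mem ?_
        intro a b ha hb hr
        have ha' : a ∈ l := (PySem.List.mem_dedup _ _).mp ha
        have hb' : b ∈ l := (PySem.List.mem_dedup _ _).mp hb
        rw [hbr, hbr, PySem.List.index?_append_of_mem [x] ha',
          PySem.List.index?_append_of_mem [x] hb']
        rw [hbr, hbr] at hr
        exact hr
      · rw [if_neg hx]
        rw [List.pairwise_append]
        refine ⟨ih.imp_of_mem ?_, List.pairwise_singleton _ _, ?_⟩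
        · intro a b ha hb hr
          have ha' : a ∈ l := (PySem.List.mem_dedup _ _).mp ha
          have hb' : b ∈ l := (PySem.List.mem_dedup _ _).mp hb
          rw [hbr, hbr, PySem.List.index?_append_of_mem [x] ha',
            PySem.List.index?_append_of_mem [x] hb']
          rw [hbr, hbr] at hr
          exact hr
        · intro a ha b hb
          rw [List.mem_singleton] at hb
          subst hb
          have ha' : a ∈ l := (PySem.List.mem_dedup _ _).mp ha
          rw [hbr, hbr, PySem.List.index?_append_of_mem [b] ha',
            PySem.List.index?_append_singleton_self l b hx]
          simpa using hbound l a ha'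

-- the two key orders are permutations of each other
lemma pvPerm (commits : List (List (String × String))) :
    (PySem.List.dedup (commits.map pvLabel)).Perm
      ((pvNames ++ ["other"]).filter (fun t => !(pvIdxs commits t).isEmpty)) := by
  have hpred : ∀ a : String, ((!(pvIdxs commits a).isEmpty) = true) ↔ a ∈ commits.map pvLabel := by
    intro a
    rw [show ((!(pvIdxs commits a).isEmpty) = true) ↔ ¬(pvIdxs commits a = []) from by
      simp, pvIdxs_nil_iff]
    exact not_not
  apply List.perm_of_nodup_nodup_toFinset_eq (PySem.List.nodup_dedup _)
    (List.Nodup.filter _ (by decide))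
  ext a
  simp only [List.mem_toFinset, PySem.List.mem_dedup, List.mem_filter]
  constructor
  · intro ha
    refine ⟨?_, (hpred a).mpr ha⟩
    obtain ⟨c, hc, rfl⟩ := List.mem_map.mp ha
    exact pvLabel_mem c
  · rintro ⟨-, hp⟩
    exact (hpred a).mp hp

-- B's groups, sorted, are the dedup-ordered entries
lemma pvSortedGroups (commits : List (List (String × String))) :
    PySem.List.sorted
        (((pvNames ++ ["other"]).filter (fun t => !(pvIdxs commits t).isEmpty)).map (pvEntry commits))
        (fun g => g.1) false
      = (PySem.List.dedup (commits.map pvLabel)).map (pvEntry commits) := by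
  apply PySem.List.sorted_eq_of_perm_of_pairwise_lt
  · exact (pvPerm commits).map (pvEntry commits)
  · rw [List.pairwise_map]
    refine (pvDedup_pairwise (commits.map pvLabel)).imp ?_
    intro a b hr
    show (pvEntry commits a).1 < (pvEntry commits b).1
    simp only [pvEntry]
    rw [pvIdxs_head_key, pvIdxs_head_key]
    exact_mod_cast hr

-- B's whole computation equals the dedup group-by
lemma pvAltMain (commits : List (List (String × String))) :
    group_by_themes_py_alt commits
      = (PySem.List.dedup (commits.map pvLabel)).map (fun lab => (lab, pvGroup commits lab)) := by
  unfold group_by_themes_py_alt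
  have hS0 : ∀ j, PySem.Set.contains (PySem.Set.empty : PySem.Set Int) j
      = pvPhi commits (([] : List (String × List String)).map (fun p => p.1)) j := by
    intro j
    unfold pvPhi
    by_cases h : 0 ≤ j ∧ j.toNat < commits.length
    · rw [dif_pos h]; simp [PySem.Set.empty, PySem.Set.contains]
    · rw [dif_neg h]; simp [PySem.Set.empty, PySem.Set.contains]
  obtain ⟨g1, g2⟩ := pvOuter commits pvKeywords [] rfl PySem.Set.empty hS0 []
  dsimp only
  rw [pvRest commits _ (fun j => g2 j), g1]
  simp only [List.nil_append]
  have hproj : ∀ lab, ((pvEntry commits lab).2.1, (pvEntry commits lab).2.2)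
      = (lab, pvGroup commits lab) := by
    intro lab
    simp [pvEntry, pvIdxs_map_get]
  cases hI : pvIdxs commits "other" with
  | nil =>
      dsimp only
      have hform : ((pvKeywords.map (fun p => p.1)).filter
            (fun t => !(pvIdxs commits t).isEmpty)).map (pvEntry commits)
          = ((pvNames ++ ["other"]).filter (fun t => !(pvIdxs commits t).isEmpty)).map
              (pvEntry commits) := by
        rw [List.filter_append]
        simp [hI, pvNames]
      rw [hform, pvSortedGroups, List.map_map]
      apply List.map_congr_left
      intro lab _
      exact hproj lab
  | cons i0 l =>
      dsimp only
      have hent : pvEntry commits "other"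
          = (i0, "other", (i0 :: l).map (fun i => PySem.List.pyGetD commits i [])) := by
        simp [pvEntry, hI]
      have hform : ((pvKeywords.map (fun p => p.1)).filter
            (fun t => !(pvIdxs commits t).isEmpty)).map (pvEntry commits)
            ++ [(i0, "other", (i0 :: l).map (fun i => PySem.List.pyGetD commits i []))]
          = ((pvNames ++ ["other"]).filter (fun t => !(pvIdxs commits t).isEmpty)).map
              (pvEntry commits) := by
        rw [List.filter_append]
        simp [hI, pvNames, hent]
      rw [hform, pvSortedGroups, List.map_map]
      apply List.map_congr_left
      intro lab _
      exact hproj lab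

-- ===== VERDICT (by name: the statement is the Claim_ definition above) =====
theorem group_by_themes_py_spec : Claim_equal_group_by_themes_py := by
  intro commits _ _
  unfold Spec_group_by_themes_py group_by_themes_py
  rw [pvMain, pvAltMain]
  apply List.map_congr_left
  intro lab _
  rw [pvGroup_zip]
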